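-- pv_equiv track=rewrite | github.com/Kevinaluyange/Kevin-Naluyange | test.py | convert_marks_to_grades
-- ===== SOURCE A (Python) =====
-- def convert_marks_to_grades(marks):
--
--     grades = []
--     for mark in marks:
--         if 90 <= mark <= 100:
--             grades.append('A')
--         elif 80 <= mark <= 89:
--             grades.append('B')
--         elif 70 <= mark <= 79:
--             grades.append('C')
--         elif 60 <= mark <= 69:
--             grades.append('D')
--         elif 50 <= mark <= 59:
--             grades.append('E')
--         else:
--             grades.append('F')
--     return grades
-- ===== SOURCE B (Python) =====
-- def convert_marks_to_grades(marks):
--     # arithmetic: for 50..100 the letter is determined by the tens digit (100 clamped to 99)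
--     return ["EDCBA"[min(mark, 99) // 10 - 5] if 50 <= mark <= 100 else 'F'
--             for mark in marks]
-- ===== Notes on version B (the rewrite author's own statement) =====
-- stated objective: simpler
-- what changed: Replaces the five-range if/elif cascade by closed-form arithmetic: one range guard plus direct indexing 'EDCBA'[min(mark,99)//10-5] by the tens digit, eliminating all per-grade comparisons.
import Mathlib
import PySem

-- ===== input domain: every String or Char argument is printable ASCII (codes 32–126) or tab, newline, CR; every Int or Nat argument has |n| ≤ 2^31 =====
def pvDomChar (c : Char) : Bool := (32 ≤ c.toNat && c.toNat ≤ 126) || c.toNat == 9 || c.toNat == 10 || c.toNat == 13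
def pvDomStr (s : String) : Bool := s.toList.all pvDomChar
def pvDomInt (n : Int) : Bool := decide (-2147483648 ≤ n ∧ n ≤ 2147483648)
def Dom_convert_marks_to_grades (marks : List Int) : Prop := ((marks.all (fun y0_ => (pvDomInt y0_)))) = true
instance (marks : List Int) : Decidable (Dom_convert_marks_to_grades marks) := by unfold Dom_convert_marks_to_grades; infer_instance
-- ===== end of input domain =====

-- ===== PORT A =====
-- B replaces the if/elif range cascade by closed-form arithmetic indexing "EDCBA"[min(mark,99)//10-5]; same values (objective: simpler).
def convert_marks_to_grades (marks : List Int) : List String :=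
  marks.foldl (fun grades mark =>
    if 90 ≤ mark ∧ mark ≤ 100 then grades ++ ["A"]
    else if 80 ≤ mark ∧ mark ≤ 89 then grades ++ ["B"]
    else if 70 ≤ mark ∧ mark ≤ 79 then grades ++ ["C"]
    else if 60 ≤ mark ∧ mark ≤ 69 then grades ++ ["D"]
    else if 50 ≤ mark ∧ mark ≤ 59 then grades ++ ["E"]
    else grades ++ ["F"]) []

-- ===== PORT B =====
-- "EDCBA"[i] : within the guard i is in 0..4, so pyGet? is some; getD "" is an unreachable default.
def convert_marks_to_grades_alt (marks : List Int) : List String :=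
  marks.map (fun mark =>
    if 50 ≤ mark ∧ mark ≤ 100 then
      ((PySem.Str.pyGet? "EDCBA" (PySem.Int.floordiv (min mark 99) 10 - 5)).map
        (fun c => String.ofList [c])).getD ""
    else "F")

-- ===== PRECONDITION & SPEC =====
def Spec_convert_marks_to_grades (marks : List Int) (out : List String) : Prop := out = convert_marks_to_grades_alt marks
instance (marks : List Int) (out : List String) : Decidable (Spec_convert_marks_to_grades marks out) := by unfold Spec_convert_marks_to_grades; infer_instance

-- ===== CLAIM =====
def Claim_equal_convert_marks_to_grades : Prop := ∀ (marks : List Int), Dom_convert_marks_to_grades marks → Spec_convert_marks_to_grades marks (convert_marks_to_grades marks)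

-- ===== LEMMAS AND PROOFS =====
theorem point_eq (mark : Int) :
    (if 90 ≤ mark ∧ mark ≤ 100 then "A"
     else if 80 ≤ mark ∧ mark ≤ 89 then "B"
     else if 70 ≤ mark ∧ mark ≤ 79 then "C"
     else if 60 ≤ mark ∧ mark ≤ 69 then "D"
     else if 50 ≤ mark ∧ mark ≤ 59 then "E"
     else "F")
    = (if 50 ≤ mark ∧ mark ≤ 100 then
        ((PySem.Str.pyGet? "EDCBA" (PySem.Int.floordiv (min mark 99) 10 - 5)).map
          (fun c => String.ofList [c])).getD ""
      else "F") := by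
  by_cases h : 50 ≤ mark ∧ mark ≤ 100
  · obtain ⟨h1, h2⟩ := h
    interval_cases mark <;> decide
  · rw [if_neg h]
    split_ifs with h1 h2 h3 h4 h5 <;> first | rfl | omega

theorem foldl_eq (marks : List Int) (acc : List String) :
    marks.foldl (fun grades mark =>
      if 90 ≤ mark ∧ mark ≤ 100 then grades ++ ["A"]
      else if 80 ≤ mark ∧ mark ≤ 89 then grades ++ ["B"]
      else if 70 ≤ mark ∧ mark ≤ 79 then grades ++ ["C"]
      else if 60 ≤ mark ∧ mark ≤ 69 then grades ++ ["D"]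
      else if 50 ≤ mark ∧ mark ≤ 59 then grades ++ ["E"]
      else grades ++ ["F"]) acc
    = acc ++ marks.map (fun mark =>
        if 50 ≤ mark ∧ mark ≤ 100 then
          ((PySem.Str.pyGet? "EDCBA" (PySem.Int.floordiv (min mark 99) 10 - 5)).map
            (fun c => String.ofList [c])).getD ""
        else "F") := by
  induction marks generalizing acc with
  | nil => simp
  | cons m rest ih =>
    simp only [List.foldl, List.map]
    rw [← point_eq m] at *
    split_ifs <;> rw [ih] <;> simp

-- ===== VERDICT =====
theorem convert_marks_to_grades_spec : Claim_equal_convert_marks_to_grades := by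
  intro marks _
  unfold Spec_convert_marks_to_grades convert_marks_to_grades convert_marks_to_grades_alt
  simpa using foldl_eq marks []
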